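-- pv_equiv track=rewrite | github.com/mthrok/rosalind | problems/corr.py | divide_strings
-- ===== SOURCE A (Python) =====
-- from collections import defaultdict
--
-- def rev_comp(string):
--     convert = {
--         'A': 'T',
--         'T': 'A',
--         'C': 'G',
--         'G': 'C',
--     }
--     ret = ''
--     for char in string:
--         ret = convert[char] + ret
--     return ret
--
-- def divide_strings(strings):
--     indices = defaultdict(list)
--     for i, string in enumerate(strings):
--         rev_str = rev_comp(string)
--         if rev_str in indices:
--             indices[rev_str].append(i)
--         else:
--             indices[string].append(i)
--     corrects, incorrects = set(), set()
--     for index_set in indices.values():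
--         if len(index_set) >= 2:
--             for index in index_set:
--                 corrects.add(strings[index])
--                 corrects.add(rev_comp(strings[index]))
--         else:
--             for index in index_set:
--                 incorrects.add(strings[index])
--     return corrects, incorrects
-- ===== SOURCE B (Python) =====
-- from collections import Counter
--
-- def rev_comp(string):
--     convert = {
--         'A': 'T',
--         'T': 'A',
--         'C': 'G',
--         'G': 'C',
--     }
--     return ''.join(convert[char] for char in reversed(string))
--
-- def divide_strings(strings):
--     revs = [rev_comp(s) for s in strings]
--     counts = Counter(min(s, r) for s, r in zip(strings, revs))
--     corrects, incorrects = set(), set()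
--     for s, r in zip(strings, revs):
--         if counts[min(s, r)] >= 2:
--             corrects.add(s)
--             corrects.add(r)
--         else:
--             incorrects.add(s)
--     return corrects, incorrects
-- ===== Notes on version B (the rewrite author's own statement) =====
-- stated objective: simpler
-- what changed: Replaces A's dict-of-index-lists (grouping by first-seen representative, then nested loops over index groups with repeated strings[i] / rev_comp calls) by a flat Counter over canonical keys min(s, rev_comp(s)) followed by one linear classification pass over the strings themselves.
import Mathlib
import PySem

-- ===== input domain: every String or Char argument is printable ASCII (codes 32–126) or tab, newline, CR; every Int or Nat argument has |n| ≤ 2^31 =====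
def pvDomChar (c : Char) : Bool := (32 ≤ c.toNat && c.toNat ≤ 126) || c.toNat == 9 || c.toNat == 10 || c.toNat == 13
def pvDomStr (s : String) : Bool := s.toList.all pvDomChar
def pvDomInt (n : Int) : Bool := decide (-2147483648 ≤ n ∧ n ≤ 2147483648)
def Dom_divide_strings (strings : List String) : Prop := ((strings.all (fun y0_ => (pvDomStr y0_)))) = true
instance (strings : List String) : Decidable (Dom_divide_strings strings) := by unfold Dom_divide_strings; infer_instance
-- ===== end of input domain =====

-- B replaces A's dict of index groups (grouped under a first-seen representative, then
-- nested loops over the groups) by a flat Counter keyed on min(s, rev_comp(s)) and one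
-- linear classification pass over the strings (objective: simpler).
-- Both returned Python sets are modelled as PySem.Set (insertion-order dedup lists).

-- ===== PORT A =====
-- convert = {'A':'T','T':'A','C':'G','G':'C'}
def pvConvert : PySem.Dict Char Char :=
  PySem.Dict.ofList [('A', 'T'), ('T', 'A'), ('C', 'G'), ('G', 'C')]

-- ret = ''; for char in string: ret = convert[char] + ret; return ret
-- (ret kept as List Char, converted by String.ofList at the end; none = KeyError)
def rev_comp (s : String) : Option String :=
  (s.toList.foldl
      (fun acc c =>
        match acc, pvConvert.get? c with
        | some ret, some d => some (d :: ret)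
        | _, _ => none)
      (some [])).map String.ofList

-- first loop of divide_strings: build indices : defaultdict(list)
def pvStep1 (acc : Option (PySem.Dict String (List Int))) (p : Int × String) :
    Option (PySem.Dict String (List Int)) :=
  match acc with
  | none => none
  | some d =>
    match rev_comp p.2 with
    | none => none
    | some rev_str =>
      if d.contains rev_str then some (d.modify rev_str [] (· ++ [p.1]))
      else some (d.modify p.2 [] (· ++ [p.1]))

def pvLoop1 (strings : List String) : Option (PySem.Dict String (List Int)) :=
  (PySem.List.enumerate strings).foldl pvStep1 (some PySem.Dict.empty)

-- corrects.add(strings[index]); corrects.add(rev_comp(strings[index]))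
-- (rev_comp cannot fail here: loop 1 already succeeded on every string)
def pvAddCorrect (strings : List String) (co : PySem.Set String) (i : Int) : PySem.Set String :=
  PySem.Set.add (PySem.Set.add co (PySem.List.pyGetD strings i ""))
    ((rev_comp (PySem.List.pyGetD strings i "")).getD "")

-- second loop body, one index_set
def pvGroupStep (strings : List String) (ci : PySem.Set String × PySem.Set String)
    (g : List Int) : PySem.Set String × PySem.Set String :=
  if g.length ≥ 2 then
    (g.foldl (pvAddCorrect strings) ci.1, ci.2)
  else
    (ci.1, g.foldl (fun inc i => PySem.Set.add inc (PySem.List.pyGetD strings i "")) ci.2)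

def divide_strings (strings : List String) : List String × List String :=
  match pvLoop1 strings with
  | none => ([], [])   -- Python raises KeyError here; excluded by Pre_
  | some indices =>
    indices.values.foldl (pvGroupStep strings) (PySem.Set.empty, PySem.Set.empty)

-- ===== PORT B =====
-- return ''.join(convert[char] for char in reversed(string))
def pvMapConvert : List Char → Option (List Char)
  | [] => some []
  | c :: cs =>
    match pvConvert.get? c, pvMapConvert cs with
    | some d, some ds => some (d :: ds)
    | _, _ => none

def pvRevCompAlt (s : String) : Option String :=
  (pvMapConvert s.toList.reverse).map String.ofList

-- revs = [rev_comp(s) for s in strings]   (none = KeyError)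
def pvRevs : List String → Option (List String)
  | [] => some []
  | s :: ss =>
    match pvRevCompAlt s, pvRevs ss with
    | some r, some rs => some (r :: rs)
    | _, _ => none

def divide_strings_alt (strings : List String) : List String × List String :=
  match pvRevs strings with
  | none => ([], [])   -- Python raises KeyError here; excluded by Pre_
  | some revs =>
    let pairs := strings.zip revs
    let counts := PySem.Dict.counter (pairs.map (fun p => min p.1 p.2))
    pairs.foldl
      (fun ci p =>
        if counts.getD (min p.1 p.2) 0 ≥ 2 then
          (PySem.Set.add (PySem.Set.add ci.1 p.1) p.2, ci.2)
        else
          (ci.1, PySem.Set.add ci.2 p.1))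
      (PySem.Set.empty, PySem.Set.empty)

-- ===== PRECONDITION & SPEC =====
-- Pre_ excludes exactly the inputs where a string contains a character outside 'ATCG':
-- there Python's convert[char] raises KeyError in both A and B.
def Pre_divide_strings (strings : List String) : Prop :=
  (strings.all (fun s =>
    s.toList.all (fun c => c == 'A' || c == 'T' || c == 'C' || c == 'G'))) = true
instance (strings : List String) : Decidable (Pre_divide_strings strings) := by
  unfold Pre_divide_strings; infer_instance

def pvWitness_divide_strings : List String := ["ATCG", "CGAT", "TT"]

def Spec_divide_strings (strings : List String) (out : List String × List String) : Prop :=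
  out = divide_strings_alt strings
instance (strings : List String) (out : List String × List String) :
    Decidable (Spec_divide_strings strings out) := by unfold Spec_divide_strings; infer_instance

-- ===== CLAIM (what is proved, stated in full; the proofs are below) =====
def Claim_equal_divide_strings : Prop :=
  ∀ (strings : List String), Dom_divide_strings strings → Pre_divide_strings strings →
    Spec_divide_strings strings (divide_strings strings)

-- ===== LEMMAS AND PROOFS =====

-- total-function shadows of rev_comp, used only in proofs
def pvComp (c : Char) : Char :=
  if c = 'A' then 'T' else if c = 'T' then 'A' else if c = 'C' then 'G' else 'C'
def pvRC (s : String) : String := String.ofList ((s.toList.map pvComp).reverse)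
def pvValidC (c : Char) : Prop := c = 'A' ∨ c = 'T' ∨ c = 'C' ∨ c = 'G'
def pvValid (s : String) : Prop := ∀ c ∈ s.toList, pvValidC c
def pvInCls (k t : String) : Prop := t = k ∨ t = pvRC k
def pvClsB (k t : String) : Bool := t == k || t == pvRC k
def pvCnt (l : List String) (k : String) : Nat := l.countP (pvClsB k)
def pvRepsF (ks : List String) (t : String) : List String :=
  if t ∈ ks ∨ pvRC t ∈ ks then ks else ks ++ [t]
def pvReps (l : List String) : List String := l.foldl pvRepsF []
def pvIdxs (k : String) (E : List (Int × String)) : List Int :=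
  (E.filter (fun p => pvClsB k p.2)).map (·.1)
def pvStep (l : List String) (ci : PySem.Set String × PySem.Set String) (k : String) :
    PySem.Set String × PySem.Set String :=
  if 2 ≤ pvCnt l k then
    (PySem.Set.add (PySem.Set.add ci.1 k) (pvRC k), ci.2)
  else
    (ci.1, PySem.Set.add ci.2 k)
def pvC (l : List String) : PySem.Set String × PySem.Set String :=
  (pvReps l).foldl (pvStep l) ([], [])

lemma pre_valid {strings : List String} (h : Pre_divide_strings strings) :
    ∀ s ∈ strings, pvValid s := by
  intro s hs c hc
  unfold Pre_divide_strings at h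
  rw [List.all_eq_true] at h
  have h2 := h s hs
  rw [List.all_eq_true] at h2
  have h3 := h2 c hc
  simp at h3
  unfold pvValidC
  tauto

lemma comp_get (c : Char) (h : pvValidC c) : pvConvert.get? c = some (pvComp c) := by
  rcases h with h | h | h | h <;> subst h <;> decide

lemma comp_invol (c : Char) (h : pvValidC c) : pvComp (pvComp c) = c := by
  rcases h with h | h | h | h <;> subst h <;> decide

lemma comp_valid (c : Char) (h : pvValidC c) : pvValidC (pvComp c) := by
  rcases h with h | h | h | h <;> subst h <;> simp [pvComp, pvValidC]

lemma rc_valid (s : String) (h : pvValid s) : pvValid (pvRC s) := by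
  intro c hc
  simp [pvRC, String.toList_ofList] at hc
  rcases hc with ⟨c0, hc0, rfl⟩
  exact comp_valid c0 (h c0 hc0)

lemma rc_rc (s : String) (h : pvValid s) : pvRC (pvRC s) = s := by
  simp [pvRC, String.toList_ofList, List.map_reverse, List.map_map]
  have : s.toList.map (pvComp ∘ pvComp) = s.toList.map id := by
    apply List.map_congr_left
    intro c hc
    exact comp_invol c (h c hc)
  rw [this]
  simp [String.ofList_toList]

lemma revA_aux (cs : List Char) (acc : List Char) (h : ∀ c ∈ cs, pvValidC c) :
    cs.foldl
      (fun acc c =>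
        match acc, pvConvert.get? c with
        | some ret, some d => some (d :: ret)
        | _, _ => none)
      (some acc) = some ((cs.map pvComp).reverse ++ acc) := by
  induction cs generalizing acc with
  | nil => simp
  | cons c cs ih =>
    have hc := h c (by simp)
    simp only [List.foldl_cons, comp_get c hc]
    rw [ih (pvComp c :: acc) (fun d hd => h d (by simp [hd]))]
    simp

lemma revA (s : String) (h : pvValid s) : rev_comp s = some (pvRC s) := by
  unfold rev_comp
  rw [revA_aux s.toList [] h]
  simp [pvRC]

lemma mapConv (cs : List Char) (h : ∀ c ∈ cs, pvValidC c) :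
    pvMapConvert cs = some (cs.map pvComp) := by
  induction cs with
  | nil => rfl
  | cons c cs ih =>
    have hc := h c (by simp)
    simp [pvMapConvert, comp_get c hc, ih (fun d hd => h d (by simp [hd]))]

lemma revB (s : String) (h : pvValid s) : pvRevCompAlt s = some (pvRC s) := by
  unfold pvRevCompAlt
  rw [mapConv _ (fun c hc => h c (by simpa using hc))]
  simp [pvRC, List.map_reverse]

lemma revs_eq (l : List String) (h : ∀ s ∈ l, pvValid s) :
    pvRevs l = some (l.map pvRC) := by
  induction l with
  | nil => rfl
  | cons s ss ih =>
    simp only [pvRevs, revB s (h s (by simp)), ih (fun t ht => h t (by simp [ht])), List.map_cons]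

lemma cls_symm {k t : String} (hk : pvValid k) (h : pvInCls k t) : pvInCls t k := by
  rcases h with rfl | rfl
  · exact Or.inl rfl
  · exact Or.inr (rc_rc k hk).symm

lemma cls_trans {t k u : String} (ht : pvValid t) (hk : pvValid k)
    (h1 : pvInCls t u) (h2 : pvInCls k u) : pvInCls k t := by
  rcases h1 with rfl | rfl
  · exact h2
  · rcases h2 with h | h
    · have := congrArg pvRC h
      rw [rc_rc t ht] at this
      exact Or.inr this
    · have := congrArg pvRC h
      rw [rc_rc t ht, rc_rc k hk] at this
      exact Or.inl this

lemma clsB_iff {k t : String} : pvClsB k t = true ↔ pvInCls k t := by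
  simp [pvClsB, pvInCls]

lemma pvMin_eq_iff {s t : String} (hs : pvValid s) (ht : pvValid t) :
    min t (pvRC t) = min s (pvRC s) ↔ pvInCls s t := by
  constructor
  · intro h
    rcases min_choice t (pvRC t) with h1 | h1 <;> rcases min_choice s (pvRC s) with h2 | h2
    · exact Or.inl ((h1.symm.trans h).trans h2)
    · exact Or.inr ((h1.symm.trans h).trans h2)
    · have h3 : pvRC t = s := (h1.symm.trans h).trans h2
      have := congrArg pvRC h3
      rw [rc_rc t ht] at this
      exact Or.inr this
    · have h3 : pvRC t = pvRC s := (h1.symm.trans h).trans h2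
      have := congrArg pvRC h3
      rw [rc_rc t ht, rc_rc s hs] at this
      exact Or.inl this
  · intro h
    rcases h with rfl | rfl
    · rfl
    · rw [rc_rc s hs, min_comm]

lemma cnt_congr {l : List String} {k s : String} (hk : pvValid k) (h : pvInCls k s) :
    pvCnt l s = pvCnt l k := by
  apply List.countP_congr
  intro t _
  rcases h with rfl | rfl
  · rfl
  · simp only [pvClsB, rc_rc k hk, Bool.or_comm]

lemma reps_append (l : List String) (t : String) :
    pvReps (l ++ [t]) = pvRepsF (pvReps l) t := by
  simp [pvReps, List.foldl_append]

lemma reps_subset {l : List String} : ∀ k ∈ pvReps l, k ∈ l := by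
  induction l using List.reverseRecOn with
  | nil => simp [pvReps]
  | append_singleton l t ih =>
    intro k hk
    rw [reps_append] at hk
    unfold pvRepsF at hk
    split at hk
    · exact List.mem_append_left _ (ih k hk)
    · rcases List.mem_append.mp hk with h | h
      · exact List.mem_append_left _ (ih k h)
      · simp at h
        simp [h]

lemma reps_mono {l : List String} (t : String) : ∀ k ∈ pvReps l, k ∈ pvReps (l ++ [t]) := by
  intro k hk
  rw [reps_append]
  unfold pvRepsF
  split
  · exact hk
  · exact List.mem_append_left _ hk

lemma reps_cover {l : List String} (hv : ∀ s ∈ l, pvValid s) :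
    ∀ t ∈ l, ∃ k ∈ pvReps l, pvInCls k t := by
  induction l using List.reverseRecOn with
  | nil => simp
  | append_singleton l u ih =>
    intro t ht
    have hvl : ∀ s ∈ l, pvValid s := fun s hs => hv s (List.mem_append_left _ hs)
    rcases List.mem_append.mp ht with h | h
    · obtain ⟨k, hk, hc⟩ := ih hvl t h
      exact ⟨k, reps_mono u k hk, hc⟩
    · simp at h
      subst h
      rw [reps_append]
      unfold pvRepsF
      split
      · rename_i hcond
        rcases hcond with h1 | h1
        · exact ⟨t, h1, Or.inl rfl⟩
        · refine ⟨pvRC t, h1, Or.inr ?_⟩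
          rw [rc_rc t (hv t (by simp))]
      · exact ⟨t, List.mem_append_right _ (by simp), Or.inl rfl⟩

lemma reps_disj {l : List String} (hv : ∀ s ∈ l, pvValid s) :
    (pvReps l).Pairwise (fun a b => ¬ pvInCls a b ∧ ¬ pvInCls b a) := by
  induction l using List.reverseRecOn with
  | nil => simp [pvReps]
  | append_singleton l u ih =>
    have hvl : ∀ s ∈ l, pvValid s := fun s hs => hv s (List.mem_append_left _ hs)
    have hu : pvValid u := hv u (by simp)
    rw [reps_append]
    unfold pvRepsF
    split
    · exact ih hvl
    · rename_i hcond
      push Not at hcond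
      rw [List.pairwise_append]
      refine ⟨ih hvl, by simp, ?_⟩
      intro a ha b hb
      simp at hb
      subst hb
      have hrc : pvRC b = a → False := by
        intro h2
        exact hcond.2 (h2 ▸ ha)
      constructor
      · rintro (h | h)
        · exact hcond.1 (h ▸ ha)
        · apply hrc
          have h2 := congrArg pvRC h
          rwa [rc_rc a (hvl a (reps_subset a ha))] at h2
      · rintro (h | h)
        · exact hcond.1 (h.symm ▸ ha)
        · exact hrc h.symm

lemma reps_not_cls {l : List String} (hv : ∀ s ∈ l, pvValid s) {a b : String}
    (ha : a ∈ pvReps l) (hb : b ∈ pvReps l) (hne : a ≠ b) : ¬ pvInCls a b :=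
  ((reps_disj hv).forall (fun _ _ h => ⟨h.2, h.1⟩) ha hb hne).1

lemma reps_nodup {l : List String} (hv : ∀ s ∈ l, pvValid s) : (pvReps l).Nodup := by
  apply (reps_disj hv).imp
  intro a b h he
  exact h.1 (Or.inl he.symm)

lemma reps_first {l : List String} (hv : ∀ s ∈ l, pvValid s) {k : String}
    (h : k ∈ pvReps l) : ∃ l1 l2, l = l1 ++ k :: l2 ∧ ∀ t ∈ l1, ¬ pvInCls k t := by
  induction l using List.reverseRecOn with
  | nil => simp [pvReps] at h
  | append_singleton l u ih =>
    have hvl : ∀ s ∈ l, pvValid s := fun s hs => hv s (List.mem_append_left _ hs)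
    have hu : pvValid u := hv u (by simp)
    rw [reps_append] at h
    unfold pvRepsF at h
    split at h
    · obtain ⟨l1, l2, rfl, hnone⟩ := ih hvl h
      exact ⟨l1, l2 ++ [u], by simp, hnone⟩
    · rename_i hcond
      push Not at hcond
      rcases List.mem_append.mp h with h1 | h1
      · obtain ⟨l1, l2, rfl, hnone⟩ := ih hvl h1
        exact ⟨l1, l2 ++ [u], by simp, hnone⟩
      · simp at h1
        subst h1
        refine ⟨l, [], rfl, ?_⟩
        intro t ht hcls
        obtain ⟨k', hk', hc'⟩ := reps_cover hvl t ht
        have : pvInCls k' k :=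
          cls_trans hu (hvl k' (reps_subset k' hk')) hcls hc'
        rcases this with h2 | h2
        · exact hcond.1 (h2 ▸ hk')
        · have := congrArg pvRC h2
          rw [rc_rc k' (hvl k' (reps_subset k' hk'))] at this
          exact hcond.2 (this ▸ hk')

lemma idxs_append (k : String) (E : List (Int × String)) (p : Int × String) :
    pvIdxs k (E ++ [p]) = pvIdxs k E ++ (if pvClsB k p.2 then [p.1] else []) := by
  by_cases h : pvClsB k p.2 <;> simp [pvIdxs, List.filter_append, h]

lemma idxs_nil (k : String) (E : List (Int × String))
    (h : ∀ p ∈ E, ¬ pvInCls k p.2) : pvIdxs k E = [] := by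
  unfold pvIdxs
  rw [List.filter_eq_nil_iff.mpr]
  · rfl
  · intro p hp hb
    exact h p hp (clsB_iff.mp hb)

lemma loop1_char (E : List (Int × String)) (hv : ∀ p ∈ E, pvValid p.2) :
    ∃ d : PySem.Dict String (List Int),
      E.foldl pvStep1 (some PySem.Dict.empty) = some d ∧
      d.keys = pvReps (E.map (·.2)) ∧
      ∀ k ∈ d.keys, d.getD k [] = pvIdxs k E := by
  induction E using List.reverseRecOn with
  | nil =>
    refine ⟨PySem.Dict.empty, rfl, by simp [pvReps], by simp⟩
  | append_singleton E p ih =>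
    obtain ⟨d, hfold, hkeys, hgetD⟩ := ih (fun q hq => hv q (List.mem_append_left _ hq))
    have hvs : pvValid p.2 := hv p (by simp)
    have hvl : ∀ s ∈ E.map (·.2), pvValid s := by
      intro s hs
      obtain ⟨q, hq, rfl⟩ := List.mem_map.mp hs
      exact hv q (List.mem_append_left _ hq)
    have hvreps : ∀ s ∈ pvReps (E.map (·.2)), pvValid s :=
      fun s hs => hvl s (reps_subset s hs)
    have hmap : (E ++ [p]).map (·.2) = E.map (·.2) ++ [p.2] := by simp
    rw [List.foldl_append, hfold, List.foldl_cons, List.foldl_nil]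
    unfold pvStep1
    rw [revA p.2 hvs]
    by_cases hc : d.contains (pvRC p.2)
    · -- rev_str already a key
      have hrcmem : pvRC p.2 ∈ pvReps (E.map (·.2)) := hkeys ▸ (PySem.Dict.contains_iff_mem_keys d _).mp hc
      simp only [hc, if_true]
      refine ⟨_, rfl, ?_, ?_⟩
      · rw [PySem.Dict.keys_modify, PySem.Dict.keys_insert_of_contains d _ hc, hkeys,
          hmap, reps_append]
        unfold pvRepsF
        rw [if_pos (Or.inr hrcmem)]
      · intro k hk
        rw [PySem.Dict.keys_modify, PySem.Dict.keys_insert_of_contains d _ hc] at hk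
        rw [PySem.Dict.getD_modify, idxs_append]
        by_cases hks : k = pvRC p.2
        · subst hks
          rw [if_pos rfl, hgetD _ hk, if_pos]
          rw [clsB_iff]
          right
          rw [rc_rc p.2 hvs]
        · have hncls : ¬ pvClsB k p.2 = true := by
            rw [clsB_iff]
            rintro (h | h)
            · -- p.2 = k, so pvInCls k (pvRC p.2) — contradicts disjointness
              subst h
              exact reps_not_cls hvl (hkeys ▸ hk) hrcmem (fun he => hks he) (Or.inr rfl)
            · -- p.2 = pvRC k, so k = pvRC p.2
              apply hks
              have h2 := congrArg pvRC h
              rw [rc_rc k (hvreps k (hkeys ▸ hk))] at h2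
              exact h2.symm
          rw [if_neg hks, hgetD _ hk, if_neg hncls]
          simp
    · -- rev_str not a key: indices[string].append(i)
      simp only [hc, if_false, Bool.false_eq_true]
      have hrcnot : pvRC p.2 ∉ pvReps (E.map (·.2)) := by
        intro hmem
        exact absurd ((PySem.Dict.contains_iff_mem_keys d _).mpr (hkeys ▸ hmem)) (by simp [hc])
      by_cases hc2 : d.contains p.2
      · have hsmem : p.2 ∈ pvReps (E.map (·.2)) := hkeys ▸ (PySem.Dict.contains_iff_mem_keys d _).mp hc2
        refine ⟨_, rfl, ?_, ?_⟩
        · rw [PySem.Dict.keys_modify, PySem.Dict.keys_insert_of_contains d _ hc2, hkeys,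
            hmap, reps_append]
          unfold pvRepsF
          rw [if_pos (Or.inl hsmem)]
        · intro k hk
          rw [PySem.Dict.keys_modify, PySem.Dict.keys_insert_of_contains d _ hc2] at hk
          rw [PySem.Dict.getD_modify, idxs_append]
          by_cases hks : k = p.2
          · subst hks
            rw [if_pos rfl, hgetD _ hk, if_pos]
            rw [clsB_iff]
            exact Or.inl rfl
          · have hncls : ¬ pvClsB k p.2 = true := by
              rw [clsB_iff]
              rintro (h | h)
              · exact hks h.symm
              · apply hrcnot
                have h2 := congrArg pvRC h
                rw [rc_rc k (hvreps k (hkeys ▸ hk))] at h2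
                exact h2 ▸ (hkeys ▸ hk)
            rw [if_neg hks, hgetD _ hk, if_neg hncls]
            simp
      · -- brand new key p.2
        have hsnot : p.2 ∉ pvReps (E.map (·.2)) := by
          intro hmem
          exact absurd ((PySem.Dict.contains_iff_mem_keys d _).mpr (hkeys ▸ hmem)) (by simp [hc2])
        refine ⟨_, rfl, ?_, ?_⟩
        · rw [PySem.Dict.keys_modify, PySem.Dict.keys_insert_of_not_contains d _ (by simp [hc2]), hkeys,
            hmap, reps_append]
          unfold pvRepsF
          rw [if_neg]
          rintro (h | h)
          · exact hsnot h
          · exact hrcnot h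
        · intro k hk
          rw [PySem.Dict.keys_modify, PySem.Dict.keys_insert_of_not_contains d _ (by simp [hc2])] at hk
          rw [PySem.Dict.getD_modify, idxs_append]
          rcases List.mem_append.mp hk with hk1 | hk1
          · have hks : k ≠ p.2 := by
              intro h
              exact hsnot (h ▸ (hkeys ▸ hk1))
            have hncls : ¬ pvClsB k p.2 = true := by
              rw [clsB_iff]
              rintro (h | h)
              · exact hks h.symm
              · apply hrcnot
                have h2 := congrArg pvRC h
                rw [rc_rc k (hvreps k (hkeys ▸ hk1))] at h2
                exact h2 ▸ (hkeys ▸ hk1)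
            rw [if_neg hks, hgetD _ hk1, if_neg hncls]
            simp
          · simp at hk1
            subst hk1
            rw [if_pos rfl, PySem.Dict.getD_of_not_contains d _ (by simp [hc2]), if_pos (by simp [pvClsB])]
            rw [idxs_nil]
            intro q hq hcls
            obtain ⟨k', hk', hc'⟩ := reps_cover hvl q.2 (List.mem_map_of_mem hq)
            have h2 : pvInCls k' p.2 := cls_trans hvs (hvreps k' hk') hcls hc'
            rcases h2 with h2 | h2
            · exact hsnot (h2 ▸ hk')
            · apply hrcnot
              have h3 := congrArg pvRC h2
              rw [rc_rc k' (hvreps k' hk')] at h3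
              exact h3 ▸ hk' 

lemma add_of_mem {s : PySem.Set String} {x : String} (h : x ∈ s) : s.add x = s := by
  simp [PySem.Set.add, PySem.Set.contains, h]

lemma idx_val {strings : List String} {k : String} {i : Int}
    (h : i ∈ pvIdxs k (PySem.List.enumerate strings)) :
    pvInCls k (PySem.List.pyGetD strings i "") := by
  unfold pvIdxs at h
  rw [List.mem_map] at h
  obtain ⟨p, hp, rfl⟩ := h
  rw [List.mem_filter] at hp
  obtain ⟨hpE, hcls⟩ := hp
  rw [PySem.List.mem_enumerate_iff] at hpE
  obtain ⟨j, hj, rfl⟩ := hpE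
  simp only [zero_add] at *
  rw [PySem.List.pyGetD_natCast]
  have : strings.getD j "" = strings[j] := by
    simp [List.getD_eq_getElem?_getD, List.getElem?_eq_getElem hj]
  rw [this]
  exact clsB_iff.mp hcls

lemma idx_len (strings : List String) (k : String) :
    (pvIdxs k (PySem.List.enumerate strings)).length = pvCnt strings k := by
  unfold pvIdxs pvCnt
  rw [List.length_map, ← List.countP_eq_length_filter]
  conv_rhs => rw [← PySem.List.map_snd_enumerate strings 0, List.countP_map]
  rfl

lemma idx_head {strings : List String} (hv : ∀ s ∈ strings, pvValid s) {k : String}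
    (hk : k ∈ pvReps strings) :
    ∃ i rest, pvIdxs k (PySem.List.enumerate strings) = i :: rest ∧
      PySem.List.pyGetD strings i "" = k := by
  obtain ⟨l1, l2, heq, hnone⟩ := reps_first hv hk
  refine ⟨(l1.length : Int), ?_⟩
  rw [heq]
  unfold pvIdxs
  rw [show PySem.List.enumerate (l1 ++ k :: l2) =
      PySem.List.enumerate l1 ++ PySem.List.enumerate (k :: l2) (0 + l1.length) from
    PySem.List.enumerate_append l1 (k :: l2) 0]
  rw [PySem.List.enumerate_cons, List.filter_append]
  have h1 : (PySem.List.enumerate l1).filter (fun p => pvClsB k p.2) = [] := by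
    rw [List.filter_eq_nil_iff]
    intro p hp hb
    rw [PySem.List.mem_enumerate_iff] at hp
    obtain ⟨j, hj, rfl⟩ := hp
    exact hnone _ (List.getElem_mem hj) (clsB_iff.mp hb)
  rw [h1]
  rw [List.filter_cons_of_pos (by simp [pvClsB])]
  refine ⟨(List.filter (fun p => pvClsB k p.2)
      (PySem.List.enumerate l2 (0 + (l1.length : Int) + 1))).map (fun x => x.1), by simp, ?_⟩
  rw [PySem.List.pyGetD_natCast]
  simp [List.getD_eq_getElem?_getD]

lemma correct_noop (strings : List String) {k : String} (hk : pvValid k)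
    (g : List Int) (co : PySem.Set String)
    (hg : ∀ i ∈ g, pvInCls k (PySem.List.pyGetD strings i ""))
    (hin : k ∈ co) (hin2 : pvRC k ∈ co) :
    g.foldl (pvAddCorrect strings) co = co := by
  induction g with
  | nil => rfl
  | cons i g ih =>
    rw [List.foldl_cons]
    have hstep : pvAddCorrect strings co i = co := by
      unfold pvAddCorrect
      rcases hg i (by simp) with h | h <;> rw [h]
      · rw [revA k hk]
        simp only [Option.getD_some]
        rw [add_of_mem hin, add_of_mem hin2]
      · rw [revA (pvRC k) (rc_valid k hk), rc_rc k hk]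
        simp only [Option.getD_some]
        rw [add_of_mem hin2, add_of_mem hin]
    rw [hstep]
    exact ih (fun j hj => hg j (by simp [hj]))

lemma cnt_pos {strings : List String} {k : String} (hk : k ∈ strings) :
    1 ≤ pvCnt strings k :=
  List.countP_pos_iff.mpr ⟨k, hk, by simp [pvClsB]⟩

lemma fold_mono (l : List String) (ks : List String)
    (ci : PySem.Set String × PySem.Set String) (x : String) (h : x ∈ ci.1) :
    x ∈ (ks.foldl (pvStep l) ci).1 := by
  induction ks generalizing ci with
  | nil => exact h
  | cons k ks ih =>
    rw [List.foldl_cons]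
    apply ih
    unfold pvStep
    split
    · simp only
      rw [PySem.Set.mem_add]
      left
      rw [PySem.Set.mem_add]
      exact Or.inl h
    · exact h

lemma fold_mem (l : List String) (ks : List String)
    (ci : PySem.Set String × PySem.Set String) (r : String) (hr : r ∈ ks)
    (hcnt : 2 ≤ pvCnt l r) :
    r ∈ (ks.foldl (pvStep l) ci).1 ∧ pvRC r ∈ (ks.foldl (pvStep l) ci).1 := by
  induction ks generalizing ci with
  | nil => simp at hr
  | cons k ks ih =>
    rw [List.foldl_cons]
    rcases List.mem_cons.mp hr with rfl | hr2
    · constructor <;> apply fold_mono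
      · unfold pvStep
        rw [if_pos hcnt]
        simp only
        rw [PySem.Set.mem_add, PySem.Set.mem_add]
        exact Or.inl (Or.inr rfl)
      · unfold pvStep
        rw [if_pos hcnt]
        simp only
        rw [PySem.Set.mem_add]
        exact Or.inr rfl
    · exact ih (pvStep l ci k) hr2

lemma A_eq_C (strings : List String) (hv : ∀ s ∈ strings, pvValid s) :
    divide_strings strings = pvC strings := by
  have hvE : ∀ p ∈ PySem.List.enumerate strings, pvValid p.2 := by
    intro p hp
    rw [PySem.List.mem_enumerate_iff] at hp
    obtain ⟨j, hj, rfl⟩ := hp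
    exact hv _ (List.getElem_mem hj)
  obtain ⟨d, hfold, hkeys, hgetD⟩ := loop1_char (PySem.List.enumerate strings) hvE
  have hmapsnd : (PySem.List.enumerate strings).map (·.2) = strings :=
    PySem.List.map_snd_enumerate strings 0
  rw [hmapsnd] at hkeys
  unfold divide_strings pvLoop1
  rw [hfold]
  show d.values.foldl (pvGroupStep strings) (PySem.Set.empty, PySem.Set.empty) = pvC strings
  have hnd : d.keys.Nodup := hkeys ▸ reps_nodup hv
  rw [PySem.Dict.values_eq_map_keys d hnd []]
  rw [List.map_congr_left hgetD, hkeys]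
  unfold pvC
  rw [List.foldl_map]
  apply PySem.List.foldl_congr_mem
  intro ci k hkmem
  have hkv : pvValid k := hv k (reps_subset k hkmem)
  obtain ⟨i0, rest, hg, hi0⟩ := idx_head hv hkmem
  have hlen : (i0 :: rest).length = pvCnt strings k := hg ▸ idx_len strings k
  rw [hg]
  unfold pvGroupStep pvStep
  by_cases hcnt : 2 ≤ pvCnt strings k
  · rw [if_pos (by omega : (i0 :: rest).length ≥ 2), if_pos hcnt]
    congr 1
    rw [List.foldl_cons]
    have hfirst : pvAddCorrect strings ci.1 i0 =
        PySem.Set.add (PySem.Set.add ci.1 k) (pvRC k) := by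
      unfold pvAddCorrect
      rw [hi0, revA k hkv]
      rfl
    rw [hfirst]
    apply correct_noop strings hkv rest
    · intro i hi
      apply idx_val (strings := strings) (k := k)
      rw [hg]
      exact List.mem_cons_of_mem i0 hi
    · rw [PySem.Set.mem_add, PySem.Set.mem_add]
      exact Or.inl (Or.inr rfl)
    · rw [PySem.Set.mem_add]
      exact Or.inr rfl
  · have h1 : 1 ≤ pvCnt strings k := cnt_pos (reps_subset k hkmem)
    simp only [List.length_cons] at hlen
    have hr0 : rest = [] := List.length_eq_zero_iff.mp (by omega)
    subst hr0
    rw [if_neg (by simp), if_neg hcnt]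
    simp only [List.foldl_cons, List.foldl_nil]
    rw [hi0]

lemma BC_aux (strings : List String) (hv : ∀ s ∈ strings, pvValid s) :
    ∀ pre, pre <+: strings →
      pre.foldl (pvStep strings) ([], []) = (pvReps pre).foldl (pvStep strings) ([], []) := by
  intro pre
  induction pre using List.reverseRecOn with
  | nil => intro _; rfl
  | append_singleton pre s ih =>
    intro hpre
    have hpre' : pre <+: strings := (List.prefix_append pre [s]).trans hpre
    have hsv : pvValid s := hv s (hpre.subset (by simp))
    rw [List.foldl_append, ih hpre', reps_append]
    unfold pvRepsF
    split
    · rename_i hcond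
      simp only [List.foldl_cons, List.foldl_nil]
      obtain ⟨r, hr, hcls⟩ : ∃ r ∈ pvReps pre, pvInCls r s := by
        rcases hcond with h | h
        · exact ⟨s, h, Or.inl rfl⟩
        · exact ⟨pvRC s, h, Or.inr (rc_rc s hsv).symm⟩
      have hrpre : r ∈ pre := reps_subset r hr
      have hrv : pvValid r := hv r (hpre'.subset hrpre)
      have hcnt : 2 ≤ pvCnt strings s := by
        have h1 : 1 ≤ pvCnt pre s :=
          List.countP_pos_iff.mpr ⟨r, hrpre, clsB_iff.mpr (cls_symm hrv hcls)⟩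
        have h2 : pvCnt (pre ++ [s]) s = pvCnt pre s + 1 := by
          unfold pvCnt
          rw [List.countP_append]
          simp [pvClsB]
        have h3 : pvCnt (pre ++ [s]) s ≤ pvCnt strings s := hpre.sublist.countP_le
        omega
      have hcntr : 2 ≤ pvCnt strings r := by
        rw [← cnt_congr hrv hcls]
        exact hcnt
      obtain ⟨hm1, hm2⟩ := fold_mem strings (pvReps pre) ([], []) r hr hcntr
      have hsm : s ∈ ((pvReps pre).foldl (pvStep strings) ([], [])).1 := by
        rcases hcls with rfl | rfl
        · exact hm1
        · exact hm2
      have hrcm : pvRC s ∈ ((pvReps pre).foldl (pvStep strings) ([], [])).1 := by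
        rcases hcls with rfl | rfl
        · exact hm2
        · rw [rc_rc r hrv]; exact hm1
      rw [show pvStep strings ((pvReps pre).foldl (pvStep strings) ([], [])) s =
          ((((pvReps pre).foldl (pvStep strings) ([], [])).1.add s).add (pvRC s),
           ((pvReps pre).foldl (pvStep strings) ([], [])).2) from by
        unfold pvStep; rw [if_pos hcnt]]
      rw [add_of_mem hsm, add_of_mem hrcm]
    · rw [List.foldl_append]

lemma B_eq_C (strings : List String) (hv : ∀ s ∈ strings, pvValid s) :
    divide_strings_alt strings = pvC strings := by
  unfold divide_strings_alt
  rw [revs_eq strings hv]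
  simp only
  have hzip : strings.zip (strings.map pvRC) = strings.map (fun u => (u, pvRC u)) := by
    have h := @List.zip_map' String String String id pvRC strings
    simpa using h
  rw [hzip, List.map_map, List.foldl_map]
  have hcount : ∀ s ∈ strings,
      List.count (min s (pvRC s))
        (strings.map ((fun p : String × String => min p.1 p.2) ∘ fun u => (u, pvRC u))) =
      pvCnt strings s := by
    intro s hs
    rw [List.count_eq_countP, List.countP_map]
    apply List.countP_congr
    intro t ht
    by_cases h : pvInCls s t
    · have h1 : min t (pvRC t) = min s (pvRC s) := (pvMin_eq_iff (hv s hs) (hv t ht)).mpr h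
      have h2 : pvClsB s t = true := clsB_iff.mpr h
      simp only [Function.comp_apply]
      rw [h2]
      simp [h1]
    · have h1 : min t (pvRC t) ≠ min s (pvRC s) :=
        fun he => h ((pvMin_eq_iff (hv s hs) (hv t ht)).mp he)
      have h2 : pvClsB s t = false := by
        rw [← Bool.not_eq_true, clsB_iff]; exact h
      simp only [Function.comp_apply]
      rw [h2]
      simp [h1]
  refine Eq.trans (PySem.List.foldl_congr_mem strings _ (pvStep strings) _ ?_) ?_
  · intro ci s hs
    show (if (PySem.Dict.counter
          (strings.map ((fun p : String × String => min p.1 p.2) ∘ fun u => (u, pvRC u)))).getD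
          (min s (pvRC s)) 0 ≥ 2
        then (PySem.Set.add (PySem.Set.add ci.1 s) (pvRC s), ci.2)
        else (ci.1, PySem.Set.add ci.2 s)) = pvStep strings ci s
    unfold pvStep
    apply if_congr _ rfl rfl
    rw [PySem.Dict.getD_counter, hcount s hs]
    omega
  · exact BC_aux strings hv strings (List.prefix_refl strings)

-- ===== VERDICT (by name: the statement is the Claim_ definition above) =====
theorem divide_strings_spec : Claim_equal_divide_strings := by
  intro strings _ hpre
  unfold Spec_divide_strings
  rw [A_eq_C strings (pre_valid hpre), B_eq_C strings (pre_valid hpre)]
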